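-- pv_equiv track=rewrite | github.com/rouggerxavier/DocOps_Agent | docops/services/flashcard_generation.py | _select_cards_for_targets
-- ===== SOURCE A (Python) =====
-- def _select_cards_for_targets(cards: list[dict], target_counts: dict[str, int]) -> list[dict]:
--     selected: list[dict] = []
--     remaining = dict(target_counts)
--
--     for card in cards:
--         difficulty = card["difficulty"]
--         if remaining.get(difficulty, 0) <= 0:
--             continue
--         selected.append(card)
--         remaining[difficulty] -= 1
--
--     return selected
-- ===== SOURCE B (Python) =====
-- def _select_cards_for_targets(cards: list[dict], target_counts: dict[str, int]) -> list[dict]: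
--     # Pass 1: occ[i] = how many earlier cards share card i's difficulty.
--     seen: dict[str, int] = {}
--     occ: list[int] = []
--     for card in cards:
--         d = card["difficulty"]
--         occ.append(seen.get(d, 0))
--         seen[d] = seen.get(d, 0) + 1
--     # Pass 2: a card is kept iff its occurrence index is below the fixed target.
--     return [card for i, card in enumerate(cards)
--             if occ[i] < target_counts.get(card["difficulty"], 0)]
-- ===== Notes on version B (the rewrite author's own statement) =====
-- stated objective: alternative
-- what changed: Replaces A's single streaming pass that mutates a copy of target_counts (a remaining-countdown decremented as cards are selected) with a two-phase decomposition: a counting pre-pass assigns each card its occurrence index within its difficulty, then a stateless comprehension keeps a card iff that index is below the unmodified target count.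
-- outside the precondition, e.g. on _select_cards_for_targets([{'q': '1'}], {'easy': 1}): A raises KeyError, B raises KeyError
import Mathlib
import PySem

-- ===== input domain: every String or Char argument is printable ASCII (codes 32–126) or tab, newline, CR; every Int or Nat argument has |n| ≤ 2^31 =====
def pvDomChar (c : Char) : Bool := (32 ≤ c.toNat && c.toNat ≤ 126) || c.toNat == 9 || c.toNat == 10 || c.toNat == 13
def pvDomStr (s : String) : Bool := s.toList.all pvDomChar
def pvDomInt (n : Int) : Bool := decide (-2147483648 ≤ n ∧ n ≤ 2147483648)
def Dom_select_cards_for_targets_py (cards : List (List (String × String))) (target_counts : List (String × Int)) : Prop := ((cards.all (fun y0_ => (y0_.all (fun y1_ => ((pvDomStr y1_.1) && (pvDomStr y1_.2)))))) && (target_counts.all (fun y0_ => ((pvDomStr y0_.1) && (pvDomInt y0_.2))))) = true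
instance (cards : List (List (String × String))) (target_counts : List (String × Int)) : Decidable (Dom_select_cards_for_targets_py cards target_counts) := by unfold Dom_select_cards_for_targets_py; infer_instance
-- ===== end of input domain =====

-- B replaces A's streaming remaining-countdown (mutated copy of target_counts) with a counting
-- pre-pass that gives every card its occurrence index within its difficulty, followed by a
-- stateless filter against the unmodified targets; same O(n) cost ('alternative').

-- ===== PORT A =====
def select_cards_for_targets_py (cards : List (List (String × String))) (target_counts : List (String × Int)) : List (List (String × String)) :=
  -- selected = []; remaining = dict(target_counts); for card in cards: …
  (cards.foldl
    (fun st card =>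
      let difficulty := (PySem.Dict.mk card).getD "difficulty" ""   -- card["difficulty"]; KeyError excluded by Pre_
      if st.2.getD difficulty 0 ≤ 0 then st
      else (st.1 ++ [card], st.2.insert difficulty (st.2.getD difficulty 0 - 1)))
    (([] : List (List (String × String))), PySem.Dict.mk target_counts)).1

-- ===== PORT B =====
def select_cards_for_targets_py_alt (cards : List (List (String × String))) (target_counts : List (String × Int)) : List (List (String × String)) :=
  -- pass 1: seen = {}; occ = []; for card in cards: occ.append(seen.get(d,0)); seen[d] = seen.get(d,0)+1
  let pass1 := cards.foldl
    (fun st card =>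
      let d := (PySem.Dict.mk card).getD "difficulty" ""            -- card["difficulty"]; KeyError excluded by Pre_
      (st.1.insert d (st.1.getD d 0 + 1), st.2 ++ [st.1.getD d 0]))
    ((PySem.Dict.empty : PySem.Dict String Int), ([] : List Int))
  let occ := pass1.2
  -- pass 2: [card for i, card in enumerate(cards) if occ[i] < target_counts.get(card["difficulty"], 0)]
  ((PySem.List.enumerate cards).filter
    (fun ic =>
      decide (PySem.List.pyGetD occ ic.1 0
        < (PySem.Dict.mk target_counts).getD ((PySem.Dict.mk ic.2).getD "difficulty" "") 0))).map (·.2)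

-- ===== PRECONDITION & SPEC =====
-- Pre_ excludes exactly the inputs on which the Python A raises KeyError: a card without a "difficulty" key.
def Pre_select_cards_for_targets_py (cards : List (List (String × String))) (target_counts : List (String × Int)) : Prop :=
  ∀ card ∈ cards, (PySem.Dict.mk card).contains "difficulty" = true
instance (cards : List (List (String × String))) (target_counts : List (String × Int)) : Decidable (Pre_select_cards_for_targets_py cards target_counts) := by unfold Pre_select_cards_for_targets_py; infer_instance

def pvWitness_select_cards_for_targets_py : (List (List (String × String))) × (List (String × Int)) :=
  ([[("difficulty", "easy")], [("difficulty", "hard")], [("difficulty", "easy")]], [("easy", 1), ("hard", 1)])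

def Spec_select_cards_for_targets_py (cards : List (List (String × String))) (target_counts : List (String × Int)) (out : List (List (String × String))) : Prop := out = select_cards_for_targets_py_alt cards target_counts
instance (cards : List (List (String × String))) (target_counts : List (String × Int)) (out : List (List (String × String))) : Decidable (Spec_select_cards_for_targets_py cards target_counts out) := by unfold Spec_select_cards_for_targets_py; infer_instance

-- ===== CLAIM (what is proved, stated in full; the proofs are below) =====
def Claim_equal_select_cards_for_targets_py : Prop := ∀ (cards : List (List (String × String))) (target_counts : List (String × Int)), Dom_select_cards_for_targets_py cards target_counts → Pre_select_cards_for_targets_py cards target_counts → Spec_select_cards_for_targets_py cards target_counts (select_cards_for_targets_py cards target_counts)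

-- ===== LEMMAS AND PROOFS =====

-- the difficulty of a card
def pvDiff (card : List (String × String)) : String := (PySem.Dict.mk card).getD "difficulty" ""

-- number of cards of difficulty d in a list, as an Int
def pvCnt (p : List (List (String × String))) (d : String) : Int := ((p.map pvDiff).count d : Int)

-- common specification both ports are reduced to: walk the cards with a budget function f
def pvSel (f : String → Int) : List (List (String × String)) → List (List (String × String))
  | [] => []
  | c :: cs =>
    if f (pvDiff c) ≤ 0 then pvSel f cs
    else c :: pvSel (fun x => if x = pvDiff c then f (pvDiff c) - 1 else f x) cs

-- B's pass-1 'seen' dictionary after a prefix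
def pvSeen (p : List (List (String × String))) (s : PySem.Dict String Int) : PySem.Dict String Int :=
  p.foldl (fun t c => t.insert (pvDiff c) (t.getD (pvDiff c) 0 + 1)) s

-- B's pass-1 occurrence list from a given 'seen' state
def pvOcc (s : PySem.Dict String Int) : List (List (String × String)) → List Int
  | [] => []
  | c :: cs => s.getD (pvDiff c) 0 :: pvOcc (s.insert (pvDiff c) (s.getD (pvDiff c) 0 + 1)) cs

lemma pvSeen_getD (p : List (List (String × String))) (s : PySem.Dict String Int) (d : String) :
    (pvSeen p s).getD d 0 = s.getD d 0 + pvCnt p d := by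
  unfold pvSeen pvCnt
  have h := PySem.Dict.getD_foldl_insert_add_one (p.map pvDiff) s d
  rwa [List.foldl_map] at h

lemma pvOcc_length (s : PySem.Dict String Int) (cs : List (List (String × String))) :
    (pvOcc s cs).length = cs.length := by
  induction cs generalizing s with
  | nil => rfl
  | cons c cs ih => simp [pvOcc, ih]

lemma pvOcc_append (p cs : List (List (String × String))) (s : PySem.Dict String Int) :
    pvOcc s (p ++ cs) = pvOcc s p ++ pvOcc (pvSeen p s) cs := by
  induction p generalizing s with
  | nil => simp [pvOcc, pvSeen]
  | cons c p ih => simp [pvOcc, pvSeen, ih, List.foldl_cons]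

lemma pvPass1_eq (cs : List (List (String × String))) (s : PySem.Dict String Int) (acc : List Int) :
    cs.foldl
      (fun st card =>
        let d := (PySem.Dict.mk card).getD "difficulty" ""
        (st.1.insert d (st.1.getD d 0 + 1), st.2 ++ [st.1.getD d 0]))
      (s, acc) = (pvSeen cs s, acc ++ pvOcc s cs) := by
  induction cs generalizing s acc with
  | nil => simp [pvSeen, pvOcc]
  | cons c cs ih => simp [List.foldl_cons, ih, pvSeen, pvOcc, pvDiff, List.append_assoc]

lemma pvLoopA (cs : List (List (String × String))) (acc : List (List (String × String)))
    (rem : PySem.Dict String Int) :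
    (cs.foldl
      (fun st card =>
        let difficulty := (PySem.Dict.mk card).getD "difficulty" ""
        if st.2.getD difficulty 0 ≤ 0 then st
        else (st.1 ++ [card], st.2.insert difficulty (st.2.getD difficulty 0 - 1)))
      (acc, rem)).1 = acc ++ pvSel (fun d => rem.getD d 0) cs := by
  induction cs generalizing acc rem with
  | nil => simp [pvSel]
  | cons c cs ih =>
    simp only [List.foldl_cons]
    by_cases h : rem.getD ((PySem.Dict.mk c).getD "difficulty" "") 0 ≤ 0
    · simp only [h, if_pos, pvSel, pvDiff]
      exact ih acc rem
    · rw [pvSel, if_neg (by simpa [pvDiff] using h)]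
      rw [if_neg (show ¬ rem.getD (pvDiff c) 0 ≤ 0 from by simpa [pvDiff] using h)]
      rw [ih (acc ++ [c]) _]
      have hfun : (fun d => (rem.insert ((PySem.Dict.mk c).getD "difficulty" "")
            (rem.getD ((PySem.Dict.mk c).getD "difficulty" "") 0 - 1)).getD d 0)
          = (fun x => if x = pvDiff c then (fun d => rem.getD d 0) (pvDiff c) - 1
              else (fun d => rem.getD d 0) x) := by
        funext d
        simp [PySem.Dict.getD_insert, pvDiff]
      rw [hfun, List.append_assoc]
      rfl

lemma pvCnt_append_singleton (p : List (List (String × String))) (c : List (String × String)) (d : String) :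
    pvCnt (p ++ [c]) d = pvCnt p d + (if pvDiff c = d then 1 else 0) := by
  by_cases h : pvDiff c = d
  · simp [pvCnt, List.count_append, h]
  · simp [pvCnt, List.count_append, h]

lemma pvLoopB (tc : List (String × Int)) (cs : List (List (String × String)))
    (p : List (List (String × String))) (f : String → Int)
    (hf : ∀ d, f d = (PySem.Dict.mk tc).getD d 0 - pvCnt p d ∨
            (f d ≤ 0 ∧ (PySem.Dict.mk tc).getD d 0 - pvCnt p d ≤ 0)) :
    ((PySem.List.enumerate cs (p.length : Int)).filter
      (fun ic =>
        decide (PySem.List.pyGetD (pvOcc PySem.Dict.empty (p ++ cs)) ic.1 0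
          < (PySem.Dict.mk tc).getD ((PySem.Dict.mk ic.2).getD "difficulty" "") 0))).map (·.2)
      = pvSel f cs := by
  induction cs generalizing p f with
  | nil => simp [pvSel, PySem.List.enumerate_nil]
  | cons c cs ih =>
    rw [PySem.List.enumerate_cons, List.filter_cons]
    -- the occurrence index of the head card is the number of earlier same-difficulty cards
    have hocc : PySem.List.pyGetD (pvOcc PySem.Dict.empty (p ++ c :: cs)) ((p.length : Nat) : Int) 0
        = pvCnt p (pvDiff c) := by
      rw [pvOcc_append, PySem.List.pyGetD_natCast]
      show (pvOcc PySem.Dict.empty p ++ ((pvSeen p PySem.Dict.empty).getD (pvDiff c) 0 :: _)).getD p.length 0 = _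
      rw [List.getD_eq_getElem?_getD, List.getElem?_append_right (by simp [pvOcc_length])]
      simp [pvOcc_length, pvSeen_getD, PySem.Dict.getD_empty]
    have hcast : ((p ++ [c]).length : Int) = (p.length : Int) + 1 := by simp
    have happ : (p ++ [c]) ++ cs = p ++ c :: cs := by simp
    by_cases hk : f (pvDiff c) ≤ 0
    · -- head not selected
      have hKle : ¬ (pvCnt p (pvDiff c) < (PySem.Dict.mk tc).getD (pvDiff c) 0) := by
        rcases hf (pvDiff c) with h1 | h1
        · omega
        · omega
      rw [if_neg (by simpa [pvDiff, hocc] using hKle)]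
      rw [pvSel, if_pos hk]
      have hf' : ∀ d, f d = (PySem.Dict.mk tc).getD d 0 - pvCnt (p ++ [c]) d ∨
          (f d ≤ 0 ∧ (PySem.Dict.mk tc).getD d 0 - pvCnt (p ++ [c]) d ≤ 0) := by
        intro d
        rw [pvCnt_append_singleton]
        by_cases hd : pvDiff c = d
        · subst hd
          right
          constructor
          · exact hk
          · omega
        · simp only [if_neg hd, add_zero]
          exact hf d
      have := ih (p ++ [c]) f hf'
      rwa [hcast, happ] at this
    · -- head selected
      have hKlt : pvCnt p (pvDiff c) < (PySem.Dict.mk tc).getD (pvDiff c) 0 := by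
        rcases hf (pvDiff c) with h1 | h1
        · omega
        · exact absurd h1.1 hk
      rw [if_pos (by simpa [pvDiff, hocc] using hKlt)]
      rw [pvSel, if_neg hk, List.map_cons]
      have hf' : ∀ d, (fun x => if x = pvDiff c then f (pvDiff c) - 1 else f x) d
            = (PySem.Dict.mk tc).getD d 0 - pvCnt (p ++ [c]) d ∨
          ((fun x => if x = pvDiff c then f (pvDiff c) - 1 else f x) d ≤ 0 ∧
            (PySem.Dict.mk tc).getD d 0 - pvCnt (p ++ [c]) d ≤ 0) := by
        intro d
        rw [pvCnt_append_singleton]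
        by_cases hd : d = pvDiff c
        · subst hd
          simp only [if_true]
          rcases hf (pvDiff c) with h1 | h1
          · left; omega
          · exact absurd h1.1 hk
        · have hd2 : ¬ pvDiff c = d := fun h => hd h.symm
          simp only [if_neg hd, if_neg hd2, add_zero]
          exact hf d
      have := ih (p ++ [c]) _ hf'
      rw [hcast, happ] at this
      rw [this]

-- ===== VERDICT (by name: the statement is the Claim_ definition above) =====
theorem select_cards_for_targets_py_spec : Claim_equal_select_cards_for_targets_py := by
  intro cards tc _ _
  show select_cards_for_targets_py cards tc = select_cards_for_targets_py_alt cards tc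
  have hA := pvLoopA cards [] (PySem.Dict.mk tc)
  have hB := pvLoopB tc cards [] (fun d => (PySem.Dict.mk tc).getD d 0)
      (fun d => Or.inl (by simp [pvCnt]))
  rw [select_cards_for_targets_py, select_cards_for_targets_py_alt, hA,
    pvPass1_eq cards PySem.Dict.empty []]
  simpa using hB.symm
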